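-- pv_equiv track=rewrite | github.com/bigbag/tknpack | src/tknpack/core/ploon/decoder.py | _find_first_unescaped
-- ===== SOURCE A (Python) =====
-- def _find_first_unescaped(text: str, ch: str) -> int:
--     """Find the first unescaped occurrence of ch in text."""
--     i = 0
--     while i < len(text):
--         if text[i] == "\\" and i + 1 < len(text):
--             i += 2
--             continue
--         if text[i : i + len(ch)] == ch:
--             return i
--         i += 1
--     return -1
-- ===== SOURCE B (Python) =====
-- def _find_first_unescaped(text: str, ch: str) -> int:
--     """Find the first unescaped occurrence of ch in text.
--
--     Precompute the set of escape-safe indices (the positions the scanner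
--     would actually test), then jump between occurrences with str.find.
--     """
--     safe = set()
--     i = 0
--     n = len(text)
--     while i < n:
--         if text[i] == "\\" and i + 1 < n:
--             i += 2
--         else:
--             safe.add(i)
--             i += 1
--     pos = text.find(ch)
--     while pos != -1:
--         if pos in safe:
--             return pos
--         pos = text.find(ch, pos + 1)
--     return -1
-- ===== Notes on version B (the rewrite author's own statement) =====
-- stated objective: faster
-- what changed: Instead of A's Python-level scan that slice-compares at every cursor position, B builds the set of escape-safe indices in one pass and then jumps between occurrences of ch with repeated C-level str.find, gating each candidate by set membership.
import Mathlib
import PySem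

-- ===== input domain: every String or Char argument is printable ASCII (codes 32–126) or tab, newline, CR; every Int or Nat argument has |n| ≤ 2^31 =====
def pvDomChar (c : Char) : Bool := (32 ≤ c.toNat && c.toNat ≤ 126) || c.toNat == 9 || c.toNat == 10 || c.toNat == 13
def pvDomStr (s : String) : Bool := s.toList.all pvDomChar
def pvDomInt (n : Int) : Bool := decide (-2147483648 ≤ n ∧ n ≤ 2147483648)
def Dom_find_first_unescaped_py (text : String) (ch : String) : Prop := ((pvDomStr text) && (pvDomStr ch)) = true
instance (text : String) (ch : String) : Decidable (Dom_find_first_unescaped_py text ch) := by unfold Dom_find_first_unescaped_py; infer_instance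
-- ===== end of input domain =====

-- B replaces A's per-character slice-compare scan by one pass precomputing the set of
-- escape-safe indices, then jumping between substring occurrences with str.find
-- (measurably faster by a constant factor: the search runs in C).

-- ===== PORT A =====
-- the while-loop of A, recursing on the index i into text
def pvALoop (t c : List Char) (i : Nat) : Int :=
  if _h : i < t.length then
    if t[i]! = '\\' ∧ i + 1 < t.length then
      pvALoop t c (i + 2)
    else if PySem.List.slice t (some (i : Int)) (some ((i : Int) + (c.length : Int))) = c then
      (i : Int)
    else
      pvALoop t c (i + 1)
  else
    -1
termination_by t.length - i

def find_first_unescaped_py (text : String) (ch : String) : Int :=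
  pvALoop text.toList ch.toList 0

-- ===== PORT B =====
-- first pass of B: collect the escape-safe indices into a set
def pvBuildSafe (t : List Char) (i : Nat) (s : PySem.Set Int) : PySem.Set Int :=
  if _h : i < t.length then
    if t[i]! = '\\' ∧ i + 1 < t.length then
      pvBuildSafe t (i + 2) s
    else
      pvBuildSafe t (i + 1) (PySem.Set.add s (i : Int))
  else
    s
termination_by t.length - i

-- second loop of B: `while pos != -1: …  pos = text.find(ch, pos+1)`; the fuel only
-- totalises the loop (positions strictly increase, so t.length + 2 steps suffice)
def pvBScan (t c : List Char) (safe : PySem.Set Int) : Nat → Int → Int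
  | 0, _ => -1
  | fuel + 1, pos =>
    if pos = -1 then -1
    else if PySem.Set.contains safe pos then pos
    else pvBScan t c safe fuel (PySem.Chars.findFrom t c (pos + 1))

def find_first_unescaped_py_alt (text : String) (ch : String) : Int :=
  let t := text.toList
  let c := ch.toList
  pvBScan t c (pvBuildSafe t 0 PySem.Set.empty) (t.length + 2) (PySem.Chars.find t c)

-- ===== PRECONDITION & SPEC =====
def Spec_find_first_unescaped_py (text : String) (ch : String) (out : Int) : Prop := out = find_first_unescaped_py_alt text ch
instance (text : String) (ch : String) (out : Int) : Decidable (Spec_find_first_unescaped_py text ch out) := by unfold Spec_find_first_unescaped_py; infer_instance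

-- ===== CLAIM (what is proved, stated in full; the proofs are below) =====
def Claim_equal_find_first_unescaped_py : Prop := ∀ (text : String) (ch : String), Dom_find_first_unescaped_py text ch → Spec_find_first_unescaped_py text ch (find_first_unescaped_py text ch)

-- ===== LEMMAS AND PROOFS =====

-- the indices A actually tests (its cursor positions that are not escape-skips)
def pvChk (t : List Char) (i : Nat) : List Nat :=
  if _h : i < t.length then
    if t[i]! = '\\' ∧ i + 1 < t.length then
      pvChk t (i + 2)
    else
      i :: pvChk t (i + 1)
  else
    []
termination_by t.length - i

def pvNatOpt : Option Nat → Int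
  | none => -1
  | some j => (j : Int)

lemma pvFind?_congr {α : Type} (l : List α) (p q : α → Bool) (h : ∀ x ∈ l, p x = q x) :
    l.find? p = l.find? q := by
  induction l with
  | nil => rfl
  | cons a l ih =>
    simp only [List.find?_cons]
    rw [h a (by simp)]
    cases q a with
    | true => rfl
    | false => exact ih (fun x hx => h x (by simp [hx]))

lemma pvMem_chk (t : List Char) (i j : Nat) (h : j ∈ pvChk t i) : i ≤ j ∧ j < t.length := by
  rw [pvChk] at h
  by_cases hlt : i < t.length
  · simp only [hlt, dif_pos] at h
    by_cases hesc : t[i]! = '\\' ∧ i + 1 < t.length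
    · rw [if_pos hesc] at h
      have := pvMem_chk t (i + 2) j h
      omega
    · rw [if_neg hesc] at h
      rcases List.mem_cons.mp h with h | h
      · omega
      · have := pvMem_chk t (i + 1) j h
        omega
  · simp [hlt] at h
termination_by t.length - i

lemma pvChk_pairwise (t : List Char) (i : Nat) : (pvChk t i).Pairwise (· < ·) := by
  rw [pvChk]
  by_cases hlt : i < t.length
  · simp only [hlt, dif_pos]
    by_cases hesc : t[i]! = '\\' ∧ i + 1 < t.length
    · rw [if_pos hesc]
      exact pvChk_pairwise t (i + 2)
    · rw [if_neg hesc]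
      refine List.pairwise_cons.mpr ⟨fun j hj => ?_, pvChk_pairwise t (i + 1)⟩
      have := pvMem_chk t (i + 1) j hj
      omega
  · simp [hlt]
termination_by t.length - i

lemma pvMem_buildSafe (t : List Char) (i : Nat) (s : PySem.Set Int) (x : Int) :
    x ∈ pvBuildSafe t i s ↔ x ∈ s ∨ ∃ j ∈ pvChk t i, x = (j : Int) := by
  rw [pvBuildSafe, pvChk]
  by_cases hlt : i < t.length
  · simp only [hlt, dif_pos]
    by_cases hesc : t[i]! = '\\' ∧ i + 1 < t.length
    · rw [if_pos hesc, if_pos hesc]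
      exact pvMem_buildSafe t (i + 2) s x
    · rw [if_neg hesc, if_neg hesc]
      rw [pvMem_buildSafe t (i + 1) _ x]
      simp only [PySem.Set.mem_add, List.mem_cons]
      constructor
      · rintro ((h | h) | ⟨j, hj, rfl⟩)
        · exact Or.inl h
        · exact Or.inr ⟨i, Or.inl rfl, h⟩
        · exact Or.inr ⟨j, Or.inr hj, rfl⟩
      · rintro (h | ⟨j, (rfl | hj), rfl⟩)
        · exact Or.inl (Or.inl h)
        · exact Or.inl (Or.inr rfl)
        · exact Or.inr ⟨j, hj, rfl⟩
  · simp [hlt]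
termination_by t.length - i

lemma pvALoop_char (t c : List Char) (i : Nat) :
    pvALoop t c i = pvNatOpt ((pvChk t i).find? (fun j => decide (c <+: t.drop j))) := by
  rw [pvALoop, pvChk]
  by_cases hlt : i < t.length
  · simp only [hlt, dif_pos]
    by_cases hesc : t[i]! = '\\' ∧ i + 1 < t.length
    · rw [if_pos hesc, if_pos hesc]
      exact pvALoop_char t c (i + 2)
    · rw [if_neg hesc, if_neg hesc]
      have hiff : (PySem.List.slice t (some (i : Int)) (some ((i : Int) + (c.length : Int))) = c)
          ↔ c <+: t.drop i := by
        rw [PySem.List.slice_natCast_add, List.prefix_iff_eq_take]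
        constructor <;> (intro h; exact h.symm)
      rw [List.find?_cons]
      by_cases hp : c <+: t.drop i
      · rw [if_pos (hiff.mpr hp)]
        simp [hp, pvNatOpt]
      · rw [if_neg (fun h => hp (hiff.mp h))]
        simp only [hp, decide_false]
        exact pvALoop_char t c (i + 1)
  · simp [hlt, pvNatOpt]
termination_by t.length - i

-- CPython's find: a start past len(s) yields -1
lemma pvFindFrom_gt (t c : List Char) (s : Nat) (h : t.length < s) :
    PySem.Chars.findFrom t c (s : Int) = -1 := by
  unfold PySem.Chars.findFrom
  dsimp only
  rw [if_neg (show ¬ (s : Int) < 0 by omega),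
    if_pos (show (t.length : Int) < (s : Int) by exact_mod_cast h)]

-- first element of a strictly sorted list satisfying p, when a minimal satisfier is a member
lemma pvFind?_first (l : List Nat) (p : Nat → Bool) (j : Nat)
    (hsort : l.Pairwise (· < ·)) (hmem : j ∈ l) (hp : p j = true)
    (hmin : ∀ x ∈ l, p x = true → j ≤ x) : l.find? p = some j := by
  induction l with
  | nil => cases hmem
  | cons a l ih =>
    rw [List.find?_cons]
    rcases List.mem_cons.mp hmem with rfl | hmem'
    · rw [hp]
    · have haj : a < j := (List.pairwise_cons.mp hsort).1 j hmem'
      have hpa : p a = false := by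
        cases hpa : p a with
        | false => rfl
        | true => exact absurd (hmin a (by simp) hpa) (by omega)
      rw [hpa]
      exact ih (List.pairwise_cons.mp hsort).2 hmem'
        (fun x hx hpx => hmin x (by simp [hx]) hpx)

lemma pvNoPrefix_of_not_infix {t c : List Char} {s : Nat}
    (h : ¬ c <:+: t.drop s) {j : Nat} (hj : s ≤ j) : ¬ c <+: t.drop j := by
  intro hpre
  apply h
  rw [← PySem.Chars.isIn_iff_infix, ← PySem.Chars.exists_prefix_drop_iff_isIn]
  exact ⟨j - s, by rwa [List.drop_drop, show s + (j - s) = j by omega]⟩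

lemma pvBScan_char (t c : List Char) (fuel s : Nat)
    (hs : s ≤ t.length + 1) (hfuel : t.length + 2 - s ≤ fuel) :
    pvBScan t c (pvBuildSafe t 0 PySem.Set.empty) fuel (PySem.Chars.findFrom t c (s : Int)) =
      pvNatOpt ((pvChk t 0).find? (fun j => decide (s ≤ j ∧ c <+: t.drop j))) := by
  obtain ⟨fuel', rfl⟩ : ∃ f, fuel = f + 1 := ⟨fuel - 1, by omega⟩
  have hmemsafe : ∀ x : Int,
      x ∈ pvBuildSafe t 0 PySem.Set.empty ↔ ∃ j ∈ pvChk t 0, x = (j : Int) := by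
    intro x
    rw [pvMem_buildSafe]
    simp [PySem.Set.empty]
  by_cases hF : PySem.Chars.findFrom t c (s : Int) = -1
  · rw [hF, pvBScan, if_pos rfl]
    have hnone : (pvChk t 0).find? (fun j => decide (s ≤ j ∧ c <+: t.drop j)) = none := by
      rw [List.find?_eq_none]
      intro j hj
      simp only [decide_eq_true_eq, not_and]
      intro hsj hpre
      rcases Nat.lt_or_ge t.length s with hgt | hle
      · exact absurd (pvMem_chk t 0 j hj).2 (by omega)
      · rw [PySem.Chars.findFrom_natCast_eq_neg_one_iff t c s hle] at hF
        exact pvNoPrefix_of_not_infix hF hsj hpre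
    rw [hnone]
    rfl
  · have hle : s ≤ t.length := by
      by_contra hgt
      exact hF (pvFindFrom_gt t c s (by omega))
    obtain ⟨hsF, hpreF, hminF⟩ := PySem.Chars.findFrom_natCast_spec t c s hle hF
    have hFlen : PySem.Chars.findFrom t c (s : Int) ≤ t.length := by
      rw [PySem.Chars.findFrom_natCast t c s hle]
      have h1 := PySem.Chars.find_le_length (t.drop s) c
      rw [List.length_drop] at h1
      split_ifs with h2
      · omega
      · omega
    obtain ⟨p, hFp⟩ : ∃ p : Nat, PySem.Chars.findFrom t c (s : Int) = (p : Int) :=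
      ⟨(PySem.Chars.findFrom t c (s : Int)).toNat, by omega⟩
    rw [hFp] at hsF hF hFlen hpreF hminF ⊢
    rw [Int.toNat_natCast] at hpreF hminF
    have hsp : s ≤ p := by exact_mod_cast hsF
    have hplen : p ≤ t.length := by exact_mod_cast hFlen
    rw [pvBScan, if_neg hF]
    by_cases hmem : ((p : Int)) ∈ pvBuildSafe t 0 PySem.Set.empty
    · rw [if_pos ((PySem.Set.contains_iff _ _).mpr hmem)]
      have hpchk : p ∈ pvChk t 0 := by
        obtain ⟨j, hj, hje⟩ := (hmemsafe _).mp hmem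
        have : p = j := by omega
        rwa [this]
      have hfind : (pvChk t 0).find? (fun j => decide (s ≤ j ∧ c <+: t.drop j)) = some p := by
        apply pvFind?_first _ _ p (pvChk_pairwise t 0) hpchk
        · simp only [decide_eq_true_eq]
          exact ⟨hsp, hpreF⟩
        · intro x _ hx
          simp only [decide_eq_true_eq] at hx
          by_contra hlt
          exact hminF x hx.1 (by omega) hx.2
      rw [hfind]
      rfl
    · rw [if_neg (by simpa [PySem.Set.contains_iff] using hmem)]
      have hcast : (p : Int) + 1 = ((p + 1 : Nat) : Int) := by omega
      rw [hcast, pvBScan_char t c fuel' (p + 1) (by omega) (by omega)]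
      congr 1
      apply pvFind?_congr
      intro j hj
      have hjp : ¬ j = p := by
        intro rfljp
        exact hmem ((hmemsafe _).mpr ⟨j, hj, by omega⟩)
      rw [decide_eq_decide]
      constructor
      · rintro ⟨hsj, hpre⟩
        exact ⟨by omega, hpre⟩
      · rintro ⟨hsj, hpre⟩
        refine ⟨?_, hpre⟩
        by_contra hjlt
        exact hminF j hsj (by omega) hpre

-- ===== VERDICT (by name: the statement is the Claim_ definition above) =====
theorem find_first_unescaped_py_spec : Claim_equal_find_first_unescaped_py := by
  intro text ch _
  unfold Spec_find_first_unescaped_py find_first_unescaped_py find_first_unescaped_py_alt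
  show pvALoop text.toList ch.toList 0 =
    pvBScan text.toList ch.toList (pvBuildSafe text.toList 0 PySem.Set.empty)
      (text.toList.length + 2) (PySem.Chars.find text.toList ch.toList)
  rw [← PySem.Chars.findFrom_zero text.toList ch.toList]
  rw [show (0 : Int) = ((0 : Nat) : Int) by norm_num]
  rw [pvBScan_char _ _ _ 0 (by omega) (by omega), pvALoop_char]
  congr 1
  apply pvFind?_congr
  intro j _
  simp
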